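-- pv_equiv track=rewrite | github.com/noblematt/noblematt.github.io | wc-finals-draw/lib/usadraw.py | draw_pot
-- ===== SOURCE A (Python) =====
-- SET_EF = {"E", "F"}
--
-- def draw_pot(pot, groups=("", "", "", "", "", "", "", "", "", "", "", "")):
--     """
--     Generate the state of the groups given teams coming out of the pot in the
--     sequence defined by `pot`
--     If the given sequence of teams cannot legally be placed, returns None
--     """
--     # If no teams are left in the pot, we are finished
--     if not pot:
--         return groups
--
--     # Establish the size of an available group, and the number of teams from the
--     # next team's confederation that are allowed in a group
--     min_group_len = min(map(len, groups))
--     team = pot[0]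
--     max_double_europes_reached = 4 == sum(
--         sum(c in "DE" for c in g) == 2 for g in groups
--     )
--     max_count = 2 if (team in "DE" and not max_double_europes_reached) else 1
--
--     # Iterate over the groups, placing the team in the first legal group
--     for i, group in enumerate(groups):
--         # If the group is larger than the smallest, it already has a team from this pot
--         if len(group) > min_group_len:
--             continue
--
--         if len(group) == 3 and not any(c in group + team for c in "DE"):
--             continue
--
--         # If the group already has the maximum number of teams from this confederation, move on
--         if sum(confederations_clash(c, team) for c in group) >= max_count:
--             continue
--
--         # Construct the new groups and call this function with the remaining teams
--         new_groups = tuple(g if i != j else g + team for j, g in enumerate(groups))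
--         if groups_are_illegal(new_groups):
--             continue
--
--         result = draw_pot(pot[1:], new_groups)
--
--         # If we can successfully assign the remaining teams, return the result
--         if result:
--             return result
--
-- def confederations_clash(a, b):
--     if a == b:
--         return True
--     if a in "CMU" and b in "NPQ":
--         return True
--     if a in "FON" and b == "P":
--         return True
--     if a in "ASN" and b == "Q":
--         return True
--     if a in "DE" and b in "DE":
--         return True
--
--     return False
--
-- def groups_are_illegal(groups):
--     if not all(len(g) == len(groups[0]) for g in groups):
--         return False
--     if len(groups[0]) == 4:
--         return False
--
--     if all(any(c in group[:3] for c in "CMUNAS") for group in groups):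
--         return True
--
--     if all(any(c in group[:3] for c in "CMUNOF") for group in groups):
--         return True
--
--     if len(groups[0]) == 3:
--         african_allowed_count = sum(
--             any(c in g for c in "DE") and not "F" in g for g in groups
--         )
--         if african_allowed_count < 3:
--             return True
--
--         if not any(set(g) == SET_EF for g in groups):
--             return True
--
--     return False
-- ===== SOURCE B (Python) =====
-- # B: explicit LIFO stack of (pot, groups) frames instead of recursion; same DFS preorder, same result.
-- SET_EF = {"E", "F"}
--
--
-- def confederations_clash(a, b):
--     if a == b:
--         return True
--     if a in "CMU" and b in "NPQ":
--         return True
--     if a in "FON" and b == "P":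
--         return True
--     if a in "ASN" and b == "Q":
--         return True
--     if a in "DE" and b in "DE":
--         return True
--
--     return False
--
--
-- def groups_are_illegal(groups):
--     if not all(len(g) == len(groups[0]) for g in groups):
--         return False
--     if len(groups[0]) == 4:
--         return False
--
--     if all(any(c in group[:3] for c in "CMUNAS") for group in groups):
--         return True
--
--     if all(any(c in group[:3] for c in "CMUNOF") for group in groups):
--         return True
--
--     if len(groups[0]) == 3:
--         african_allowed_count = sum(
--             any(c in g for c in "DE") and not "F" in g for g in groups
--         )
--         if african_allowed_count < 3:
--             return True
--
--         if not any(set(g) == SET_EF for g in groups):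
--             return True
--
--     return False
--
--
-- def draw_pot(pot, groups=("", "", "", "", "", "", "", "", "", "", "", "")):
--     """Iterative depth-first search with an explicit stack; first finished
--     assignment in DFS preorder wins, None if the stack empties."""
--     stack = [(pot, groups)]
--     while stack:
--         p, gs = stack.pop()
--         if not p:
--             return gs
--         min_group_len = min(map(len, gs))
--         team = p[0]
--         max_double_europes_reached = 4 == sum(
--             sum(c in "DE" for c in g) == 2 for g in gs
--         )
--         max_count = 2 if (team in "DE" and not max_double_europes_reached) else 1
--         succs = []
--         for i, group in enumerate(gs):
--             if len(group) > min_group_len: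
--                 continue
--             if len(group) == 3 and not any(c in group + team for c in "DE"):
--                 continue
--             if sum(confederations_clash(c, team) for c in group) >= max_count:
--                 continue
--             new_groups = tuple(g if i != j else g + team for j, g in enumerate(gs))
--             if groups_are_illegal(new_groups):
--                 continue
--             succs.append((p[1:], new_groups))
--         stack.extend(reversed(succs))
--     return None
-- ===== Notes on version B (the rewrite author's own statement) =====
-- stated objective: alternative
-- what changed: Replaces the recursive backtracking with an explicit LIFO stack of (pot, groups) frames: successors are pushed in reverse so the pop order reproduces the same DFS preorder, and the first frame with an empty pot is returned.
import Mathlib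
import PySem

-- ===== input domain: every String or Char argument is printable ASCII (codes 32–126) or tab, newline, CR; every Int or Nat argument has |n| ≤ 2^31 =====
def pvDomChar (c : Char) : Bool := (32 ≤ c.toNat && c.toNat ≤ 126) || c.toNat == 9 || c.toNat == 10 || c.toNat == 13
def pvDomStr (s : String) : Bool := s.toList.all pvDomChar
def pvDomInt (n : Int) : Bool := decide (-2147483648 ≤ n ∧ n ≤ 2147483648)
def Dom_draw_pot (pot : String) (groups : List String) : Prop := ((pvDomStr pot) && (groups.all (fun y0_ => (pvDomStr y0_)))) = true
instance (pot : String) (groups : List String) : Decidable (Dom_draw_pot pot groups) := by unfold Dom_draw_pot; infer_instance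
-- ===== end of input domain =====

-- B re-implements the recursive backtracking as an explicit LIFO stack machine with the
-- same DFS preorder (objective: alternative decomposition, same cost); return value only.

-- ===== PORT A =====
-- shared module helper: confederations_clash(a, b)
def confClash (a b : Char) : Bool :=
  if a == b then true
  else if ['C','M','U'].contains a && ['N','P','Q'].contains b then true
  else if ['F','O','N'].contains a && b == 'P' then true
  else if ['A','S','N'].contains a && b == 'Q' then true
  else if ['D','E'].contains a && ['D','E'].contains b then true
  else false

-- shared module helper: groups_are_illegal(groups); groups = [] is unreachable under Pre_
-- (Python raises IndexError there), ported as `false`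
def groupsIllegal (gs : List (List Char)) : Bool :=
  match gs with
  | [] => false
  | g0 :: _ =>
    if !(gs.all (fun g => g.length == g0.length)) then false
    else if g0.length == 4 then false
    else if gs.all (fun g => ['C','M','U','N','A','S'].any (fun c => (g.take 3).contains c)) then true
    else if gs.all (fun g => ['C','M','U','N','O','F'].any (fun c => (g.take 3).contains c)) then true
    else if g0.length == 3 then
      -- african_allowed_count
      if gs.countP (fun g => (['D','E'].any (fun c => g.contains c)) && !(g.contains 'F')) < 3 then true
      -- set(g) == {"E","F"}
      else if !(gs.any (fun g => g.contains 'E' && g.contains 'F' && g.all (fun c => c == 'E' || c == 'F'))) then true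
      else false
    else false

-- min(map(len, groups)); gs = [] is unreachable under Pre_ (Python raises ValueError there)
def pyMinLen (gs : List (List Char)) : Nat :=
  match gs.map List.length with
  | [] => 0
  | x :: xs => xs.foldl min x

-- the for-loop over enumerate(groups) inside A's recursion; `f` is the recursive
-- call on the remaining pot (structural recursion on the pot, see drawRec)
def tryCands (f : List (List Char) → Option (List (List Char))) (team : Char)
    (gs : List (List Char)) (minLen maxCount : Nat) :
    List (Int × List Char) → Option (List (List Char))
  | [] => none
  | ig :: more =>
    if ig.2.length > minLen then tryCands f team gs minLen maxCount more
    else if ig.2.length == 3 && !(['D','E'].any (fun c => (ig.2 ++ [team]).contains c)) then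
      tryCands f team gs minLen maxCount more
    else if ig.2.countP (fun c => confClash c team) ≥ maxCount then
      tryCands f team gs minLen maxCount more
    else
      -- new_groups (written inline)
      if groupsIllegal ((PySem.List.enumerate gs).map (fun jg => if ig.1 != jg.1 then jg.2 else jg.2 ++ [team])) then
        tryCands f team gs minLen maxCount more
      else
        match f ((PySem.List.enumerate gs).map (fun jg => if ig.1 != jg.1 then jg.2 else jg.2 ++ [team])) with
        | some r => if r.isEmpty then tryCands f team gs minLen maxCount more else some r
        | none => tryCands f team gs minLen maxCount more

-- the recursion of A
def drawRec : List Char → List (List Char) → Option (List (List Char))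
  | [], gs => some gs
  | team :: rest, gs =>
    let minLen := pyMinLen gs
    let maxDouble := (gs.countP (fun g => g.countP (fun c => ['D','E'].contains c) == 2)) == 4
    let maxCount : Nat := if ['D','E'].contains team && !maxDouble then 2 else 1
    tryCands (drawRec rest) team gs minLen maxCount (PySem.List.enumerate gs)

def draw_pot (pot : String) (groups : List String) : Option (List String) :=
  (drawRec pot.toList (groups.map String.toList)).map (fun gs => gs.map String.ofList)

-- ===== PORT B =====
-- total measure for the stack machine: Σ (|groups|+1)^|pot| over the frames
def pvMeasure (st : List (List Char × List (List Char))) : Nat :=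
  (st.map (fun f => (f.2.length + 1) ^ f.1.length)).sum

-- the stack strictly shrinks in measure when a frame with nonempty pot is expanded
theorem pvMeasure_dec (gs : List (List Char)) (team : Char) (rest : List Char)
    (stack succs : List (List Char × List (List Char)))
    (hlen : succs.length ≤ gs.length)
    (hmem : ∀ f ∈ succs, f.1 = rest ∧ f.2.length = gs.length) :
    pvMeasure (succs ++ stack) < pvMeasure ((team :: rest, gs) :: stack) := by
  have hsum : (succs.map (fun f => (f.2.length + 1) ^ f.1.length)).sum
      ≤ succs.length * (gs.length + 1) ^ rest.length := by
    calc (succs.map (fun f => (f.2.length + 1) ^ f.1.length)).sum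
        ≤ (succs.map (fun f => (f.2.length + 1) ^ f.1.length)).length • ((gs.length + 1) ^ rest.length) := by
          apply List.sum_le_card_nsmul
          intro x hx
          obtain ⟨f, hf, rfl⟩ := List.mem_map.1 hx
          obtain ⟨h1, h2⟩ := hmem f hf
          rw [h1, h2]
      _ = succs.length * (gs.length + 1) ^ rest.length := by
          simp [smul_eq_mul]
  have hpow : (0:ℕ) < (gs.length + 1) ^ rest.length := pow_pos (by omega) _
  have : succs.length * (gs.length + 1) ^ rest.length < (gs.length + 1) ^ (rest.length + 1) := by
    have h1 : succs.length * (gs.length + 1) ^ rest.length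
        ≤ gs.length * (gs.length + 1) ^ rest.length := Nat.mul_le_mul_right _ hlen
    have h2 : (gs.length + 1) ^ (rest.length + 1)
        = (gs.length + 1) * (gs.length + 1) ^ rest.length := by ring
    nlinarith
  simp only [pvMeasure, List.map_append, List.sum_append, List.map_cons, List.sum_cons,
    List.length_cons]
  omega

-- the exact decreasing fact runStack's termination cites
theorem pvSuccs_dec (team : Char) (rest : List Char) (gs : List (List Char))
    (stack : List (List Char × List (List Char))) (minLen maxCount : Nat) :
    pvMeasure (((PySem.List.enumerate gs).filterMap (fun ig =>
        if ig.2.length > minLen then none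
        else if ig.2.length == 3 && !(['D','E'].any (fun c => (ig.2 ++ [team]).contains c)) then none
        else if ig.2.countP (fun c => confClash c team) ≥ maxCount then none
        else
          if groupsIllegal ((PySem.List.enumerate gs).map (fun jg => if ig.1 != jg.1 then jg.2 else jg.2 ++ [team])) then none
          else some (rest, (PySem.List.enumerate gs).map (fun jg => if ig.1 != jg.1 then jg.2 else jg.2 ++ [team])))) ++ stack)
      < pvMeasure ((team :: rest, gs) :: stack) := by
  apply pvMeasure_dec gs team rest stack
  · exact le_trans (List.length_filterMap_le _ _) (by simp [PySem.List.length_enumerate])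
  · intro f hf
    obtain ⟨ig, hig, hsome⟩ := List.mem_filterMap.1 hf
    split_ifs at hsome
    all_goals cases hsome
    all_goals exact ⟨rfl, by simp [PySem.List.length_enumerate]⟩

def runStack : List (List Char × List (List Char)) → Option (List (List Char))
  | [] => none
  | (p, gs) :: stack =>
    match p with
    | [] => some gs
    | team :: rest =>
      let minLen := pyMinLen gs
      let maxDouble := (gs.countP (fun g => g.countP (fun c => ['D','E'].contains c) == 2)) == 4
      let maxCount : Nat := if ['D','E'].contains team && !maxDouble then 2 else 1
      -- build the legal successor frames in i-order (`succs`), then push them reversed: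
      -- with the stack's top at the list head, pop-from-end + reversed extend = succs ++ stack
      let succs := (PySem.List.enumerate gs).filterMap (fun ig =>
        if ig.2.length > minLen then none
        else if ig.2.length == 3 && !(['D','E'].any (fun c => (ig.2 ++ [team]).contains c)) then none
        else if ig.2.countP (fun c => confClash c team) ≥ maxCount then none
        else
          -- new_groups (written inline)
          if groupsIllegal ((PySem.List.enumerate gs).map (fun jg => if ig.1 != jg.1 then jg.2 else jg.2 ++ [team])) then none
          else some (rest, (PySem.List.enumerate gs).map (fun jg => if ig.1 != jg.1 then jg.2 else jg.2 ++ [team])))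
      runStack (succs ++ stack)
termination_by st => pvMeasure st
decreasing_by
  exact pvSuccs_dec team rest gs stack _ _

def draw_pot_alt (pot : String) (groups : List String) : Option (List String) :=
  (runStack [(pot.toList, groups.map String.toList)]).map (fun gs => gs.map String.ofList)

-- ===== PRECONDITION & SPEC =====
-- Pre_ excludes exactly the inputs where A raises ValueError (min() of an empty
-- sequence): nonempty pot with an empty groups list; B raises there too.
def Pre_draw_pot (pot : String) (groups : List String) : Prop := pot = "" ∨ groups ≠ []
instance (pot : String) (groups : List String) : Decidable (Pre_draw_pot pot groups) := by
  unfold Pre_draw_pot; infer_instance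

def pvWitness_draw_pot : String × List String := ("DAC", ["", "", "", ""])

def Spec_draw_pot (pot : String) (groups : List String) (out : Option (List String)) : Prop := out = draw_pot_alt pot groups
instance (pot : String) (groups : List String) (out : Option (List String)) : Decidable (Spec_draw_pot pot groups out) := by unfold Spec_draw_pot; infer_instance

-- ===== CLAIM (what is proved, stated in full; the proofs are below) =====
def Claim_equal_draw_pot : Prop := ∀ (pot : String) (groups : List String), Dom_draw_pot pot groups → Pre_draw_pot pot groups → Spec_draw_pot pot groups (draw_pot pot groups)

-- ===== LEMMAS AND PROOFS =====

theorem tryCands_length (f : List (List Char) → Option (List (List Char))) (team : Char)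
    (gs : List (List Char)) (minLen maxCount : Nat)
    (Hrec : ∀ gs' r, f gs' = some r → r.length = gs'.length) :
    ∀ cands r, tryCands f team gs minLen maxCount cands = some r → r.length = gs.length := by
  intro cands
  induction cands with
  | nil => intro r h; simp [tryCands] at h
  | cons ig more ih =>
    intro r h
    rw [tryCands] at h
    split_ifs at h with h1 h2 h3 h4
    · exact ih r h
    · exact ih r h
    · exact ih r h
    · exact ih r h
    · revert h
      cases hrec : f ((PySem.List.enumerate gs).map
          (fun jg => if ig.1 != jg.1 then jg.2 else jg.2 ++ [team])) with
      | none => intro h; exact ih r h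
      | some r' =>
        intro h
        by_cases hemp : r'.isEmpty
        · simp only [hemp, if_true] at h; exact ih r h
        · simp only [hemp, if_false] at h
          cases h
          have := Hrec _ _ hrec
          simpa [PySem.List.length_enumerate] using this

theorem drawRec_length : ∀ (p : List Char) (gs r : List (List Char)),
    drawRec p gs = some r → r.length = gs.length := by
  intro p
  induction p with
  | nil => intro gs r h; rw [drawRec] at h; cases h; rfl
  | cons team rest ih =>
    intro gs r h
    rw [drawRec] at h
    exact tryCands_length (drawRec rest) team gs _ _ ih _ r h

-- one expansion step of the stack machine equals one call of A's recursion, for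
-- nonempty groups (the only shape the machine ever pushes)
theorem runStack_eq : ∀ (p : List Char) (gs : List (List Char))
    (stack : List (List Char × List (List Char))), gs ≠ [] →
    runStack ((p, gs) :: stack)
      = match drawRec p gs with
        | some r => some r
        | none => runStack stack := by
  intro p
  induction p with
  | nil =>
    intro gs stack _
    rw [runStack, drawRec]
  | cons team rest ih =>
    intro gs stack hgs
    rw [runStack, drawRec]
    generalize hML : pyMinLen gs = minLen
    generalize hMC : (if ['D','E'].contains team &&
        !((gs.countP (fun g => g.countP (fun c => ['D','E'].contains c) == 2)) == 4)
        then (2:Nat) else 1) = maxCount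
    have main : ∀ (cands : List (Int × List Char))
        (stack : List (List Char × List (List Char))),
        runStack ((cands.filterMap (fun ig =>
          if ig.2.length > minLen then none
          else if ig.2.length == 3 && !(['D','E'].any (fun c => (ig.2 ++ [team]).contains c)) then none
          else if ig.2.countP (fun c => confClash c team) ≥ maxCount then none
          else
            if groupsIllegal ((PySem.List.enumerate gs).map (fun jg => if ig.1 != jg.1 then jg.2 else jg.2 ++ [team])) then none
            else some (rest, (PySem.List.enumerate gs).map (fun jg => if ig.1 != jg.1 then jg.2 else jg.2 ++ [team])))) ++ stack)
          = match tryCands (drawRec rest) team gs minLen maxCount cands with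
            | some r => some r
            | none => runStack stack := by
      intro cands
      induction cands with
      | nil => intro stack; simp [tryCands]
      | cons ig more ihc =>
        intro stack
        rw [tryCands]
        by_cases h1 : ig.2.length > minLen
        · simp only [h1, if_true, List.filterMap_cons]; exact ihc stack
        · simp only [h1, if_false, List.filterMap_cons]
          by_cases h2 : (ig.2.length == 3 && !(['D','E'].any (fun c => (ig.2 ++ [team]).contains c))) = true
          · simp only [h2, if_true]; exact ihc stack
          · simp only [h2, if_false]
            by_cases h3 : ig.2.countP (fun c => confClash c team) ≥ maxCount
            · simp only [h3, if_true]; exact ihc stack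
            · simp only [h3, if_false]
              by_cases h4 : groupsIllegal ((PySem.List.enumerate gs).map (fun jg => if ig.1 != jg.1 then jg.2 else jg.2 ++ [team])) = true
              · simp only [h4, if_true]; exact ihc stack
              · simp only [h4, if_false]
                set newGs := (PySem.List.enumerate gs).map (fun jg => if ig.1 != jg.1 then jg.2 else jg.2 ++ [team]) with hNG
                have hne : newGs ≠ [] := by
                  simp only [hNG, ne_eq, List.map_eq_nil_iff]
                  intro hc
                  exact hgs (by simpa [PySem.List.length_enumerate] using congrArg List.length hc)
                simp only [Bool.false_eq_true, if_false, List.cons_append]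
                rw [ih newGs _ hne]
                cases hrec : drawRec rest newGs with
                | none => exact ihc stack
                | some r =>
                  have hr : ¬ r.isEmpty := by
                    have := drawRec_length rest newGs r hrec
                    have hlen : newGs.length = gs.length := by
                      simp [hNG, PySem.List.length_enumerate]
                    rw [List.isEmpty_iff]
                    intro hc
                    subst hc
                    rw [hlen] at this
                    exact hgs (List.length_eq_zero_iff.1 this.symm)
                  simp [hr]
    exact main (PySem.List.enumerate gs) stack

-- ===== VERDICT (by name: the statement is the Claim_ definition above) =====
theorem draw_pot_spec : Claim_equal_draw_pot := by
  intro pot groups _ hpre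
  unfold Spec_draw_pot draw_pot draw_pot_alt
  by_cases hg : groups = []
  · subst hg
    cases hpre with
    | inl hp =>
      subst hp
      have h0 : "".toList = ([] : List Char) := rfl
      rw [h0, show (List.map String.toList ([]:List String)) = [] from rfl, drawRec, runStack]
    | inr hne => exact absurd rfl hne
  · have hne : groups.map String.toList ≠ [] := by
      simpa [List.map_eq_nil_iff] using hg
    rw [runStack_eq pot.toList (groups.map String.toList) [] hne]
    cases h : drawRec pot.toList (groups.map String.toList) with
    | none => simp [runStack]
    | some r => simp
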